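-- pv_equiv track=rewrite | github.com/medkhalilsakis/MediTriage | BackEnd/chatbot/ai_service.py | _find_condition_mentions
-- ===== SOURCE A (Python) =====
-- def _find_condition_mentions(normalized_text, known_disease_terms, max_items=2):
--     if not normalized_text:
--         return []
--
--     padded_text = f' {normalized_text} '
--     mentions = []
--     for disease_key in sorted(known_disease_terms.keys(), key=len, reverse=True):
--         if len(disease_key) < 4:
--             continue
--         token = f' {disease_key} '
--         if token in padded_text:
--             mentions.append(disease_key)
--         if len(mentions) >= max_items:
--             break
--
--     return mentions
-- ===== SOURCE B (Python) =====
-- def _find_condition_mentions(normalized_text, known_disease_terms, max_items=2):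
--     if not normalized_text:
--         return []
--
--     padded = ' ' + normalized_text + ' '
--     # Index the text once: every space-delimited gram (substring between two
--     # space positions) of useful length, so each key test is one set lookup.
--     maxlen = max((len(k) for k in known_disease_terms if len(k) >= 4), default=0)
--     spaces = [i for i, ch in enumerate(padded) if ch == ' ']
--     grams = set()
--     for a, i in enumerate(spaces):
--         for j in spaces[a + 1:]:
--             if j - i - 1 > maxlen:
--                 break
--             grams.add(padded[i + 1:j])
--
--     mentions = []
--     for key in sorted(known_disease_terms, key=len, reverse=True):
--         if len(key) < 4:
--             continue
--         if key in grams: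
--             mentions.append(key)
--         if len(mentions) >= max_items:
--             break
--     return mentions
-- ===== Notes on version B (the rewrite author's own statement) =====
-- stated objective: faster
-- what changed: B indexes the text once into a set of space-delimited grams (bounded by the longest useful key) so each key is tested by one set lookup instead of a substring scan of the whole text.
import Mathlib
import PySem

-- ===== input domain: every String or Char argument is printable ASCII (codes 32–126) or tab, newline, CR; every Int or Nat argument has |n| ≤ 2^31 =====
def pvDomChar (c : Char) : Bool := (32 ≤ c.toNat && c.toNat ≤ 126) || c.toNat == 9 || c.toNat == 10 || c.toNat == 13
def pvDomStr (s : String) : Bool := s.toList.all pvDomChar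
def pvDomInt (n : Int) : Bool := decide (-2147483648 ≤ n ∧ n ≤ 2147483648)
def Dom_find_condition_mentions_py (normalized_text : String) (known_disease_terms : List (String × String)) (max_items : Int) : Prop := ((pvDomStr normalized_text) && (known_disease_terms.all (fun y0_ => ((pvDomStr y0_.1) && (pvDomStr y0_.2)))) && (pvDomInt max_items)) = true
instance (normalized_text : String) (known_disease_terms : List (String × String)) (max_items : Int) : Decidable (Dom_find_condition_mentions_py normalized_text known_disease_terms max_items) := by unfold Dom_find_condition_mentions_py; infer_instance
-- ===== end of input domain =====

-- B replaces A's per-key substring scans by one precomputed set of space-delimited grams (objective: faster; lookup per key instead of a text scan).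

-- ===== PORT A =====
-- A's loop over the length-sorted keys: append on substring hit, break once max_items reached.
def pvALoop (padded : List Char) (max_items : Int) : List String → List String → List String
  | [], mentions => mentions
  | k :: rest, mentions =>
    if PySem.Str.len k < 4 then pvALoop padded max_items rest mentions
    else
      let token := ' ' :: k.toList ++ [' ']
      let mentions' := if PySem.Chars.isIn token padded then mentions ++ [k] else mentions
      if max_items ≤ (mentions'.length : Int) then mentions' else pvALoop padded max_items rest mentions'

def find_condition_mentions_py (normalized_text : String) (known_disease_terms : List (String × String)) (max_items : Int) : List String :=
  if normalized_text.toList = [] then []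
  else
    let padded := ' ' :: normalized_text.toList ++ [' ']  -- f' {normalized_text} ' on code points
    let keys := PySem.List.dedup (known_disease_terms.map Prod.fst)  -- dict keys, insertion order
    pvALoop padded max_items (PySem.List.sorted keys (fun k => PySem.Str.len k) true) []

-- ===== PORT B =====
-- positions of ' ' in the char list, counting from i (hand port of the enumerate comprehension, exact)
def pvSpaces : List Char → Nat → List Nat
  | [], _ => []
  | c :: cs, i => if c == ' ' then i :: pvSpaces cs (i + 1) else pvSpaces cs (i + 1)

-- inner loop over the later space positions, with the break on over-long grams
def pvInner (padded : List Char) (maxlen : Int) (i : Nat) : List Nat → PySem.Set (List Char) → PySem.Set (List Char)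
  | [], g => g
  | j :: rest, g =>
    if maxlen < (j : Int) - (i : Int) - 1 then g
    else pvInner padded maxlen i rest (PySem.Set.add g ((padded.drop (i + 1)).take (j - (i + 1))))

-- outer loop over the space positions
def pvGrams (padded : List Char) (maxlen : Int) : List Nat → PySem.Set (List Char) → PySem.Set (List Char)
  | [], g => g
  | i :: rest, g => pvGrams padded maxlen rest (pvInner padded maxlen i rest g)

-- B's selection loop: same scan over the sorted keys, but a set lookup per key
def pvBLoop (grams : PySem.Set (List Char)) (max_items : Int) : List String → List String → List String
  | [], mentions => mentions
  | k :: rest, mentions =>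
    if PySem.Str.len k < 4 then pvBLoop grams max_items rest mentions
    else
      let mentions' := if PySem.Set.contains grams k.toList then mentions ++ [k] else mentions
      if max_items ≤ (mentions'.length : Int) then mentions' else pvBLoop grams max_items rest mentions'

def find_condition_mentions_py_alt (normalized_text : String) (known_disease_terms : List (String × String)) (max_items : Int) : List String :=
  if normalized_text.toList = [] then []
  else
    let padded := ' ' :: normalized_text.toList ++ [' ']
    let keys := PySem.List.dedup (known_disease_terms.map Prod.fst)
    let maxlen := ((keys.filter (fun k => 4 ≤ PySem.Str.len k)).map (fun k => PySem.Str.len k)).foldl max 0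
    let grams := pvGrams padded maxlen (pvSpaces padded 0) PySem.Set.empty
    pvBLoop grams max_items (PySem.List.sorted keys (fun k => PySem.Str.len k) true) []

-- ===== PRECONDITION & SPEC =====
def Spec_find_condition_mentions_py (normalized_text : String) (known_disease_terms : List (String × String)) (max_items : Int) (out : List String) : Prop := out = find_condition_mentions_py_alt normalized_text known_disease_terms max_items
instance (normalized_text : String) (known_disease_terms : List (String × String)) (max_items : Int) (out : List String) : Decidable (Spec_find_condition_mentions_py normalized_text known_disease_terms max_items out) := by unfold Spec_find_condition_mentions_py; infer_instance

-- ===== CLAIM (what is proved, stated in full; the proofs are below) =====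
def Claim_equal_find_condition_mentions_py : Prop := ∀ (normalized_text : String) (known_disease_terms : List (String × String)) (max_items : Int), Dom_find_condition_mentions_py normalized_text known_disease_terms max_items → Spec_find_condition_mentions_py normalized_text known_disease_terms max_items (find_condition_mentions_py normalized_text known_disease_terms max_items)

-- ===== LEMMAS AND PROOFS =====

theorem mem_pvSpaces (cs : List Char) (s p : Nat) :
    p ∈ pvSpaces cs s ↔ s ≤ p ∧ p - s < cs.length ∧ cs[p - s]? = some ' ' := by
  induction cs generalizing s with
  | nil => simp [pvSpaces]
  | cons c cs ih =>
    simp only [pvSpaces]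
    by_cases hc : c = ' '
    · subst hc
      simp only [BEq.rfl, if_true, List.mem_cons, ih]
      constructor
      · rintro (rfl | ⟨h1, h2, h3⟩)
        · exact ⟨le_refl _, by simp, by simp⟩
        · refine ⟨by omega, by simp only [List.length_cons]; omega, ?_⟩
          have he : p - s = (p - (s + 1)) + 1 := by omega
          rw [he, List.getElem?_cons_succ]; exact h3
      · rintro ⟨h1, h2, h3⟩
        by_cases hp : p = s
        · exact Or.inl hp
        · have he : p - s = (p - (s + 1)) + 1 := by omega
          rw [he, List.getElem?_cons_succ] at h3
          exact Or.inr ⟨by omega, by simp only [List.length_cons] at h2; omega, h3⟩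
    · rw [if_neg (by simp [hc])]
      rw [ih]
      constructor
      · rintro ⟨h1, h2, h3⟩
        refine ⟨by omega, by simp only [List.length_cons]; omega, ?_⟩
        have he : p - s = (p - (s + 1)) + 1 := by omega
        rw [he, List.getElem?_cons_succ]; exact h3
      · rintro ⟨h1, h2, h3⟩
        by_cases hp : p = s
        · subst hp
          simp only [Nat.sub_self, List.getElem?_cons_zero, Option.some.injEq] at h3
          exact absurd h3 hc
        · have he : p - s = (p - (s + 1)) + 1 := by omega
          rw [he, List.getElem?_cons_succ] at h3
          exact ⟨by omega, by simp only [List.length_cons] at h2; omega, h3⟩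

theorem le_of_mem_pvSpaces (cs : List Char) (s p : Nat) (h : p ∈ pvSpaces cs s) : s ≤ p :=
  ((mem_pvSpaces cs s p).1 h).1

theorem pvSpaces_pairwise (cs : List Char) (s : Nat) : (pvSpaces cs s).Pairwise (· < ·) := by
  induction cs generalizing s with
  | nil => exact List.Pairwise.nil
  | cons c cs ih =>
    simp only [pvSpaces]
    by_cases hc : (c == ' ') = true
    · rw [if_pos hc]
      exact List.Pairwise.cons (fun q hq => lt_of_lt_of_le (Nat.lt_succ_self s) (le_of_mem_pvSpaces cs (s + 1) q hq)) (ih (s + 1))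
    · rw [if_neg hc]; exact ih (s + 1)

theorem mem_pvInner (padded : List Char) (maxlen : Int) (i : Nat) (rest : List Nat) (g : PySem.Set (List Char))
    (hs : rest.Pairwise (· < ·)) (x : List Char) :
    x ∈ pvInner padded maxlen i rest g ↔
      x ∈ g ∨ ∃ j ∈ rest, (j : Int) - i - 1 ≤ maxlen ∧ x = (padded.drop (i + 1)).take (j - (i + 1)) := by
  revert hs
  induction rest generalizing g with
  | nil => intro _; simp [pvInner]
  | cons j rest ih =>
    intro hs
    simp only [pvInner]
    by_cases hbr : maxlen < (j : Int) - (i : Int) - 1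
    · rw [if_pos hbr]
      constructor
      · exact fun hx => Or.inl hx
      · rintro (hx | ⟨j', hj', hle, _⟩)
        · exact hx
        · exfalso
          rcases List.mem_cons.1 hj' with rfl | hj'
          · omega
          · have : j < j' := (List.pairwise_cons.1 hs).1 j' hj'
            omega
    · rw [if_neg hbr]
      rw [ih _ (List.pairwise_cons.1 hs).2]
      rw [PySem.Set.mem_add]
      constructor
      · rintro ((hx | rfl) | ⟨j', hj', hle, hx⟩)
        · exact Or.inl hx
        · exact Or.inr ⟨j, List.mem_cons_self, by omega, rfl⟩
        · exact Or.inr ⟨j', List.mem_cons_of_mem _ hj', hle, hx⟩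
      · rintro (hx | ⟨j', hj', hle, hx⟩)
        · exact Or.inl (Or.inl hx)
        · rcases List.mem_cons.1 hj' with rfl | hj'
          · exact Or.inl (Or.inr hx)
          · exact Or.inr ⟨j', hj', hle, hx⟩

theorem mem_pvGrams (padded : List Char) (maxlen : Int) (sp : List Nat) (g : PySem.Set (List Char))
    (hs : sp.Pairwise (· < ·)) (x : List Char) :
    x ∈ pvGrams padded maxlen sp g ↔
      x ∈ g ∨ ∃ i ∈ sp, ∃ j ∈ sp, i < j ∧ (j : Int) - i - 1 ≤ maxlen ∧ x = (padded.drop (i + 1)).take (j - (i + 1)) := by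
  revert hs
  induction sp generalizing g with
  | nil => intro _; simp [pvGrams]
  | cons i rest ih =>
    intro hs
    have hhead : ∀ j ∈ rest, i < j := (List.pairwise_cons.1 hs).1
    have htail : rest.Pairwise (· < ·) := (List.pairwise_cons.1 hs).2
    simp only [pvGrams]
    rw [ih _ htail]
    rw [mem_pvInner padded maxlen i rest _ htail]
    constructor
    · rintro ((hx | ⟨j, hj, hle, hx⟩) | ⟨i', hi', j, hj, hij, hle, hx⟩)
      · exact Or.inl hx
      · exact Or.inr ⟨i, List.mem_cons_self, j, List.mem_cons_of_mem _ hj, hhead j hj, hle, hx⟩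
      · exact Or.inr ⟨i', List.mem_cons_of_mem _ hi', j, List.mem_cons_of_mem _ hj, hij, hle, hx⟩
    · rintro (hx | ⟨i', hi', j', hj', hij, hle, hx⟩)
      · exact Or.inl (Or.inl hx)
      · rcases List.mem_cons.1 hi' with hie | hmem
        · subst hie
          rcases List.mem_cons.1 hj' with hje | hjm
          · exfalso; subst hje; omega
          · exact Or.inl (Or.inr ⟨j', hjm, hle, hx⟩)
        · rcases List.mem_cons.1 hj' with hje | hjm
          · exfalso; subst hje; exact absurd (hhead i' hmem) (by omega)
          · exact Or.inr ⟨i', hmem, j', hjm, hij, hle, hx⟩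

theorem infix_iff_positions (P K : List Char) :
    (' ' :: K ++ [' ']) <:+: P ↔
      ∃ i j : Nat, i < j ∧ j < P.length ∧ P[i]? = some ' ' ∧ P[j]? = some ' ' ∧
        K = (P.drop (i + 1)).take (j - (i + 1)) ∧ j - i - 1 = K.length := by
  constructor
  · rintro ⟨s, t, h⟩
    have hlen : P.length = s.length + (K.length + 2) + t.length := by
      rw [← h]; simp [List.length_append]; omega
    refine ⟨s.length, s.length + K.length + 1, by omega, by omega, ?_, ?_, ?_, by omega⟩
    · rw [← h, List.append_assoc, List.getElem?_append_right (le_refl s.length)]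
      simp
    · rw [← h, List.append_assoc,
        List.getElem?_append_right (by omega : s.length ≤ s.length + K.length + 1)]
      have h1 : s.length + K.length + 1 - s.length = K.length + 1 := by omega
      rw [h1, List.getElem?_append_left (by simp)]
      rw [show (' ' :: K ++ [' ']) = (' ' :: K) ++ [' '] from by simp]
      rw [List.getElem?_append_right (by simp)]
      simp
    · have h2 : s.length + K.length + 1 - (s.length + 1) = K.length := by omega
      rw [h2]
      have hP : P = (s ++ [' ']) ++ (K ++ ' ' :: t) := by rw [← h]; simp
      rw [hP, show s.length + 1 = (s ++ [' ']).length from by simp, List.drop_left]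
      exact List.take_left.symm
  · rintro ⟨i, j, hij, hjlt, hPi, hPj, hK, hlen⟩
    have hilt : i < P.length := lt_trans hij hjlt
    have hgi : P[i] = ' ' := by
      rw [List.getElem?_eq_getElem hilt] at hPi; exact Option.some.inj hPi
    have hgj : P[j] = ' ' := by
      rw [List.getElem?_eq_getElem hjlt] at hPj; exact Option.some.inj hPj
    refine ⟨P.take i, P.drop (j + 1), ?_⟩
    have e1 : P.drop i = ' ' :: P.drop (i + 1) := by
      rw [List.drop_eq_getElem_cons hilt, hgi]
    have e3 : P.drop j = ' ' :: P.drop (j + 1) := by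
      rw [List.drop_eq_getElem_cons hjlt, hgj]
    have e2 : P.drop (i + 1) = K ++ ' ' :: P.drop (j + 1) := by
      conv_lhs => rw [← List.take_append_drop (j - (i + 1)) (P.drop (i + 1))]
      rw [← hK, List.drop_drop]
      have h3 : i + 1 + (j - (i + 1)) = j := by omega
      rw [h3, e3]
    calc P.take i ++ (' ' :: K ++ [' ']) ++ P.drop (j + 1)
        = P.take i ++ ' ' :: (K ++ ' ' :: P.drop (j + 1)) := by simp
      _ = P.take i ++ P.drop i := by rw [← e2, ← e1]
      _ = P := List.take_append_drop i P

theorem loops_eq (padded : List Char) (grams : PySem.Set (List Char)) (max_items : Int) :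
    ∀ ks : List String, (∀ k ∈ ks, ¬ PySem.Str.len k < 4 →
        PySem.Chars.isIn (' ' :: k.toList ++ [' ']) padded = PySem.Set.contains grams k.toList) →
    ∀ m, pvALoop padded max_items ks m = pvBLoop grams max_items ks m := by
  intro ks
  induction ks with
  | nil => intro _ m; rfl
  | cons k rest ih =>
    intro h m
    have hrest := fun k' hk' => h k' (List.mem_cons_of_mem _ hk')
    simp only [pvALoop, pvBLoop]
    by_cases h4 : PySem.Str.len k < 4
    · rw [if_pos h4, if_pos h4]
      exact ih hrest m
    · rw [if_neg h4, if_neg h4, h k List.mem_cons_self h4]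
      by_cases hc : max_items ≤ (((if PySem.Set.contains grams k.toList then m ++ [k] else m).length : Nat) : Int)
      · rw [if_pos hc, if_pos hc]
      · rw [if_neg hc, if_neg hc]
        exact ih hrest _

-- ===== VERDICT (by name: the statement is the Claim_ definition above) =====
theorem find_condition_mentions_py_spec : Claim_equal_find_condition_mentions_py := by
  unfold Claim_equal_find_condition_mentions_py
  intro t kdt mi _
  unfold Spec_find_condition_mentions_py find_condition_mentions_py find_condition_mentions_py_alt
  by_cases ht : t.toList = []
  · rw [if_pos ht, if_pos ht]
  · rw [if_neg ht, if_neg ht]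
    apply loops_eq
    intro k hk h4
    have hkm : k ∈ PySem.List.dedup (kdt.map Prod.fst) :=
      (PySem.List.mem_sorted _ _ _ _).1 hk
    have hfk : PySem.Str.len k ∈
        ((PySem.List.dedup (kdt.map Prod.fst)).filter (fun k => 4 ≤ PySem.Str.len k)).map
          (fun k => PySem.Str.len k) :=
      List.mem_map_of_mem (List.mem_filter.2 ⟨hkm, by simpa using not_lt.1 h4⟩)
    have hlenk : PySem.Str.len k ≤
        (((PySem.List.dedup (kdt.map Prod.fst)).filter (fun k => 4 ≤ PySem.Str.len k)).map
          (fun k => PySem.Str.len k)).foldl max 0 :=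
      (PySem.List.le_foldl_max _ 0).2 _ hfk
    rw [PySem.Str.len_eq] at hlenk
    rw [Bool.eq_iff_iff, PySem.Chars.isIn_iff_infix, PySem.Set.contains_iff,
      mem_pvGrams _ _ _ _ (pvSpaces_pairwise _ 0), infix_iff_positions]
    constructor
    · rintro ⟨i, j, hij, hjl, hPi, hPj, hK, hjk⟩
      refine Or.inr ⟨i, ?_, j, ?_, hij, ?_, hK⟩
      · exact (mem_pvSpaces _ 0 i).2 ⟨Nat.zero_le _, by simpa using lt_trans hij hjl, by simpa using hPi⟩
      · exact (mem_pvSpaces _ 0 j).2 ⟨Nat.zero_le _, by simpa using hjl, by simpa using hPj⟩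
      · omega
    · rintro (hfalse | ⟨i, hi, j, hj, hij, hle, hK⟩)
      · exact absurd hfalse (List.not_mem_nil)
      · obtain ⟨-, hiL, hPi⟩ := (mem_pvSpaces _ 0 i).1 hi
        obtain ⟨-, hjL, hPj⟩ := (mem_pvSpaces _ 0 j).1 hj
        simp only [Nat.sub_zero] at hiL hjL hPi hPj
        refine ⟨i, j, hij, hjL, hPi, hPj, hK, ?_⟩
        have hmin : k.toList.length = min (j - (i + 1)) ((' ' :: t.toList ++ [' ']).length - (i + 1)) := by
          rw [hK]; simp [List.length_take, List.length_drop]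
        omega
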